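-- pv_equiv track=rewrite | github.com/teachamantofish/RAGMaster | AI_RAG/pipeline/common/metadata_utils.py | _extract_leading_yaml_block
-- ===== SOURCE A (Python) =====
-- def _extract_leading_yaml_block(text: str) -> tuple[dict, str]:
--     """If text starts with a YAML front matter block (--- ... ---),
--     return (parsed_dict, remaining_text). Extremely lightweight parser that
--     only handles flat key: value pairs (no nesting). If no block, returns ({}, original text).
--     """
--     stripped = text.lstrip()  # allow leading newlines
--     if not stripped.startswith('---'):
--         return {}, text
--     # Find closing fence
--     parts = stripped.split('\n')
--     if len(parts) < 2:
--         return {}, text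
--     block_lines = []
--     # skip first fence
--     for line in parts[1:]:  # Collect YAML lines until next '---'.
--         if line.strip() == '---':
--             break
--         block_lines.append(line)
--     else:  # no closing fence
--         return {}, text
--     # Reconstruct remainder after first closing fence
--     # Find index of closing fence
--     closing_index = 1 + len(block_lines)
--     remainder = '\n'.join(parts[closing_index+1:])
--     meta: dict = {}
--     for raw in block_lines:  # Parse simple key: value pairs.
--         if ':' not in raw:
--             continue
--         k, v = raw.split(':', 1)
--         meta[k.strip()] = v.strip().strip('"').strip("'")
--     return meta, remainder
-- ===== SOURCE B (Python) =====
-- def _extract_leading_yaml_block(text: str) -> tuple[dict, str]: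
--     """Single streaming pass over the raw text: peel one line at a time with
--     find/slicing (no line list is ever built), parse key: value pairs via
--     partition as we go, stop at the closing fence."""
--     stripped = text.lstrip()
--     if not stripped.startswith('---') or '\n' not in stripped:
--         return {}, text
--     meta: dict = {}
--     s = stripped[stripped.find('\n') + 1:]
--     while True:
--         i = s.find('\n')
--         line = s if i < 0 else s[:i]
--         if line.strip() == '---':
--             return meta, ('' if i < 0 else s[i + 1:])
--         if i < 0:
--             return {}, text
--         k, sep, v = line.partition(':')
--         if sep:
--             meta[k.strip()] = v.strip().strip('"').strip("'")
--         s = s[i + 1:]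
-- ===== Notes on version B (the rewrite author's own statement) =====
-- stated objective: alternative
-- what changed: A splits the whole text into a line list, scans it with for/else to collect block_lines, and only then runs a second parsing loop; B never builds a line list: it streams over the raw text with find/slicing, peeling one line at a time and parsing key: value pairs (via partition) in the same single pass until the closing fence.
import Mathlib
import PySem

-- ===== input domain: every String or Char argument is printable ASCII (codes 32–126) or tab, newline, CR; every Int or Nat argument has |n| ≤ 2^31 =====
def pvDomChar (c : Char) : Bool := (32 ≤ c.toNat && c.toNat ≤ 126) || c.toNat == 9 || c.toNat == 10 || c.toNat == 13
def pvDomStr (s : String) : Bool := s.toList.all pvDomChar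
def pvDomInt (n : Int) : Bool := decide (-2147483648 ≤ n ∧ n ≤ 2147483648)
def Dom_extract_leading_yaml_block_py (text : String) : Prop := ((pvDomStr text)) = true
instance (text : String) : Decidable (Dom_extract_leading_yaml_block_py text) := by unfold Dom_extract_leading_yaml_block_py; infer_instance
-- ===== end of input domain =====

-- B replaces A's split-into-lines + two-phase collect-then-parse with a single streaming
-- pass over the raw text (find/slice one line at a time, parsing as it goes); same value.

-- ===== PORT A =====
-- A's 'for line in parts[1:]: … break / else' loop: collects lines before the first
-- fence line; 'none' is the for/else "no closing fence" case.
def pvScanA : List String → Option (List String)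
  | [] => none
  | l :: rest =>
    if PySem.Str.strip l == "---" then some []
    else (pvScanA rest).map (l :: ·)

-- A's 'for raw in block_lines' body: "if ':' not in raw: continue; k, v = raw.split(':', 1); meta[…] = …"
-- (split(':', 1) with ':' in raw always yields exactly two pieces; the '_ => d' arm is unreachable)
def pvStepA (d : PySem.Dict String String) (raw : String) : PySem.Dict String String :=
  if PySem.Str.isIn ":" raw then
    match PySem.Str.splitMax? raw ":" 1 with
    | some (k :: v :: _) =>
        d.insert (PySem.Str.strip k)
          (PySem.Str.stripChars (PySem.Str.stripChars (PySem.Str.strip v) "\"") "'")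
    | _ => d
  else d

def extract_leading_yaml_block_py (text : String) : (List (String × String)) × String :=
  let stripped := PySem.Str.lstrip text
  if !(PySem.Str.startswith stripped "---") then ([], text)
  else
    let parts := (PySem.Str.split? stripped "\n").getD []   -- sep "\n" ≠ "": split? is always some
    if parts.length < 2 then ([], text)
    else
      match pvScanA parts.tail with
      | none => ([], text)
      | some block_lines =>
        let closing : Nat := 1 + block_lines.length
        let remainder := PySem.Str.join "\n" (PySem.List.slice parts (some ((closing : Int) + 1)) none)
        let metaD := block_lines.foldl pvStepA PySem.Dict.empty
        (metaD.items, remainder)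

-- ===== PORT B =====
-- hand port of "k, sep, v = line.partition(':'); if sep: md[k.strip()] = v.strip().strip('\"').strip(\"'\")"
-- exact because partition's sep is nonempty iff ':' occurs in line, i.e. iff find ≥ 0,
-- and then k = line[:j], v = line[j+1:] for j = line.find(':')
def pvStepB (md : PySem.Dict String String) (line : String) : PySem.Dict String String :=
  let j := PySem.Str.find line ":"
  if 0 ≤ j then
    md.insert (PySem.Str.strip (PySem.Str.slice line none (some j)))
      (PySem.Str.stripChars (PySem.Str.stripChars
        (PySem.Str.strip (PySem.Str.slice line (some (j + 1)) none)) "\"") "'")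
  else md

-- B's 'while True' loop: peel one line off s with find/slice, parse it, recurse on the rest
def pvGoB (s : String) (md : PySem.Dict String String) :
    Option (PySem.Dict String String × String) :=
  let i := PySem.Str.find s "\n"
  let line := if i < 0 then s else PySem.Str.slice s none (some i)
  if PySem.Str.strip line == "---" then
    some (md, if i < 0 then "" else PySem.Str.slice s (some (i + 1)) none)
  else if h : i < 0 then none
  else pvGoB (PySem.Str.slice s (some (i + 1)) none) (pvStepB md line)
termination_by s.toList.length
decreasing_by
  simp only [PySem.Str.toList_slice, PySem.Chars.slice_eq_listSlice]
  have hi : (0 : Int) ≤ PySem.Str.find s "\n" := by omega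
  have h1 : PySem.Str.find s "\n" + 1 = (((PySem.Str.find s "\n").toNat + 1 : Nat) : Int) := by omega
  rw [h1, PySem.List.slice_from_natCast]
  have hinf : "\n".toList <:+: s.toList := by
    refine (PySem.Chars.find_nonneg_iff s.toList "\n".toList).mp ?_
    rw [← PySem.Str.find_eq]; exact hi
  have hne : s.toList ≠ [] := by
    intro hnil; rw [hnil] at hinf; simp at hinf
  have hpos : 0 < s.toList.length := List.length_pos_of_ne_nil hne
  simp only [List.length_drop]; omega

def extract_leading_yaml_block_py_alt (text : String) : (List (String × String)) × String :=
  let stripped := PySem.Str.lstrip text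
  if !(PySem.Str.startswith stripped "---") || !(PySem.Str.isIn "\n" stripped) then ([], text)
  else
    match pvGoB (PySem.Str.slice stripped (some (PySem.Str.find stripped "\n" + 1)) none)
        PySem.Dict.empty with
    | some (m, rem) => (m.items, rem)
    | none => ([], text)

-- ===== PRECONDITION & SPEC =====
def Spec_extract_leading_yaml_block_py (text : String) (out : (List (String × String)) × String) : Prop := out = extract_leading_yaml_block_py_alt text
instance (text : String) (out : (List (String × String)) × String) : Decidable (Spec_extract_leading_yaml_block_py text out) := by unfold Spec_extract_leading_yaml_block_py; infer_instance

-- ===== CLAIM (what is proved, stated in full; the proofs are below) =====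
def Claim_equal_extract_leading_yaml_block_py : Prop := ∀ (text : String), Dom_extract_leading_yaml_block_py text → Spec_extract_leading_yaml_block_py text (extract_leading_yaml_block_py text)

-- ===== LEMMAS AND PROOFS =====

-- ---- generic single-character facts ----
theorem pv_singleton_prefix {c : Char} {l : List Char} : [c] <+: l ↔ ∃ t, l = c :: t := by
  cases l with
  | nil => simp
  | cons x xs => simp [List.cons_prefix_cons, eq_comm]

theorem pv_singleton_infix {c : Char} {l : List Char} : [c] <:+: l ↔ c ∈ l := by
  constructor
  · intro h; exact h.subset (by simp)
  · intro h
    obtain ⟨s, t, rfl⟩ := List.append_of_mem h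
    exact ⟨s, t, by simp⟩

theorem pv_find_neg {s : List Char} {c : Char} (h : PySem.Chars.find s [c] < 0) : c ∉ s := by
  intro hm
  have : (0 : Int) ≤ PySem.Chars.find s [c] :=
    (PySem.Chars.find_nonneg_iff s [c]).mpr (pv_singleton_infix.mpr hm)
  omega

theorem pv_find_decomp {s : List Char} {c : Char} (h : 0 ≤ PySem.Chars.find s [c]) :
    s = s.take (PySem.Chars.find s [c]).toNat ++ c :: s.drop ((PySem.Chars.find s [c]).toNat + 1)
      ∧ c ∉ s.take (PySem.Chars.find s [c]).toNat := by
  obtain ⟨hp, hmin⟩ := PySem.Chars.find_spec h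
  set j := (PySem.Chars.find s [c]).toNat with hj
  obtain ⟨t, ht⟩ := pv_singleton_prefix.mp hp
  have hjlt : j < s.length := by
    by_contra hge
    rw [List.drop_eq_nil_of_le (le_of_not_gt hge)] at ht; exact (List.cons_ne_nil _ _) ht.symm
  have hdrop : s.drop (j + 1) = t := by
    have h2 : s.drop (j + 1) = (s.drop j).drop 1 := by rw [List.drop_drop]
    simp [h2, ht]
  constructor
  · conv_lhs => rw [← List.take_append_drop j s]
    rw [ht, hdrop]
  · intro hmem
    obtain ⟨k, hk, hget⟩ := List.mem_iff_getElem.mp hmem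
    have hklen : k < j := lt_of_lt_of_le hk (by rw [List.length_take]; exact min_le_left _ _)
    have hk2 : k < s.length := lt_trans hklen hjlt
    apply hmin k hklen
    refine pv_singleton_prefix.mpr ⟨s.drop (k + 1), ?_⟩
    rw [← List.getElem_cons_drop hk2]
    congr 1
    rw [← hget]
    exact (List.getElem_take).symm

theorem pv_mem_decomp {c : Char} {l : List Char} (hm : c ∈ l) :
    ∃ A B, l = A ++ c :: B ∧ c ∉ A := by
  have h0 : 0 ≤ PySem.Chars.find l [c] :=
    (PySem.Chars.find_nonneg_iff l [c]).mpr (pv_singleton_infix.mpr hm)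
  obtain ⟨hdec, hna⟩ := pv_find_decomp h0
  exact ⟨_, _, hdec, hna⟩

-- ---- splitOn on a single-character separator ----
theorem pv_go1 (c : Char) (l : List Char) (h : c ∉ l) :
    ∀ (fuel : Nat) (cur : List Char) (acc : List (List Char)),
      PySem.Chars.splitOn.go [c] fuel l cur acc = acc.reverse ++ [cur.reverse ++ l] := by
  induction l with
  | nil => intro fuel cur acc; cases fuel <;> simp [PySem.Chars.splitOn.go]
  | cons x xs ih =>
    intro fuel cur acc
    cases fuel with
    | zero => simp [PySem.Chars.splitOn.go]
    | succ f =>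
      have hx : c ≠ x := fun hh => h (hh ▸ List.mem_cons_self ..)
      have hxs : c ∉ xs := fun hm => h (List.mem_cons_of_mem _ hm)
      rw [PySem.Chars.splitOn.go]
      simp only [show [c].isPrefixOf (x :: xs) = false from by simp [List.isPrefixOf, hx],
        Bool.false_eq_true, if_false]
      rw [ih hxs f (x :: cur) acc]
      simp

theorem pv_go2 (c : Char) (a b : List Char) (ha : c ∉ a) :
    ∀ (f : Nat) (cur : List Char) (acc : List (List Char)), a.length ≤ f →
      PySem.Chars.splitOn.go [c] (f + 1) (a ++ c :: b) cur acc =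
        PySem.Chars.splitOn.go [c] (f - a.length) b [] ((cur.reverse ++ a) :: acc) := by
  induction a with
  | nil =>
    intro f cur acc _
    simp only [List.nil_append]
    rw [PySem.Chars.splitOn.go]
    simp only [show [c].isPrefixOf (c :: b) = true from by simp [List.isPrefixOf], if_true]
    simp
  | cons x xs ih =>
    intro f cur acc hf
    have hx : c ≠ x := fun hh => ha (hh ▸ List.mem_cons_self ..)
    have hxs : c ∉ xs := fun hm => ha (List.mem_cons_of_mem _ hm)
    rw [List.length_cons] at hf
    cases f with
    | zero => omega
    | succ f' =>
      simp only [List.cons_append]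
      rw [PySem.Chars.splitOn.go]
      simp only [show [c].isPrefixOf (x :: (xs ++ c :: b)) = false from by
        simp [List.isPrefixOf, hx], Bool.false_eq_true, if_false]
      rw [ih hxs f' (x :: cur) acc (by omega)]
      rw [show (x :: cur).reverse ++ xs = cur.reverse ++ (x :: xs) from by simp]
      rw [show f' + 1 - (x :: xs).length = f' - xs.length from by
        rw [List.length_cons]; omega]

theorem pv_goAcc (c : Char) :
    ∀ (n : Nat) (b : List Char), b.length ≤ n →
      ∀ (f : Nat) (acc : List (List Char)), b.length ≤ f →
        PySem.Chars.splitOn.go [c] (f + 1) b [] acc = acc.reverse ++ PySem.Chars.splitOn b [c] := by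
  intro n
  induction n with
  | zero =>
    intro b hb f acc _
    have hnil : b = [] := List.eq_nil_of_length_eq_zero (by omega)
    subst hnil
    rw [pv_go1 c [] (by simp), PySem.Chars.splitOn, pv_go1 c [] (by simp)]
    simp
  | succ m ih =>
    intro b hb f acc hf
    by_cases hm : c ∈ b
    · obtain ⟨A, B, hdec, hna⟩ := pv_mem_decomp hm
      subst hdec
      have hlen : (A ++ c :: B).length = A.length + 1 + B.length := by
        rw [List.length_append, List.length_cons]; omega
      rw [hlen] at hb hf
      have hcons : PySem.Chars.splitOn (A ++ c :: B) [c] = A :: PySem.Chars.splitOn B [c] := by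
        rw [PySem.Chars.splitOn, hlen]
        rw [show A.length + 1 + B.length + 1 = (A.length + 1 + B.length) + 1 from rfl]
        rw [pv_go2 c A B hna _ [] [] (by omega)]
        rw [show A.length + 1 + B.length - A.length = B.length + 1 from by omega]
        rw [ih B (by omega) B.length _ le_rfl]
        simp
      rw [pv_go2 c A B hna f [] acc (by omega)]
      rw [show f - A.length = (f - A.length - 1) + 1 from by omega]
      rw [ih B (by omega) (f - A.length - 1) _ (by omega)]
      rw [hcons]
      simp
    · rw [pv_go1 c b hm, PySem.Chars.splitOn, pv_go1 c b hm]
      simp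

theorem pv_splitOn_cons {c : Char} {a : List Char} (b : List Char) (ha : c ∉ a) :
    PySem.Chars.splitOn (a ++ c :: b) [c] = a :: PySem.Chars.splitOn b [c] := by
  have hlen : (a ++ c :: b).length = a.length + 1 + b.length := by
    rw [List.length_append, List.length_cons]; omega
  rw [PySem.Chars.splitOn, hlen]
  rw [show a.length + 1 + b.length + 1 = (a.length + 1 + b.length) + 1 from rfl]
  rw [pv_go2 c a b ha _ [] [] (by omega)]
  rw [show a.length + 1 + b.length - a.length = b.length + 1 from by omega]
  rw [pv_goAcc c b.length b le_rfl b.length _ le_rfl]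
  simp

theorem pv_splitOn_nomem {c : Char} {b : List Char} (h : c ∉ b) :
    PySem.Chars.splitOn b [c] = [b] := by
  rw [PySem.Chars.splitOn, pv_go1 c b h]; simp

theorem pv_splitOn_ne_nil (c : Char) (l : List Char) : PySem.Chars.splitOn l [c] ≠ [] := by
  by_cases hm : c ∈ l
  · obtain ⟨A, B, hdec, hna⟩ := pv_mem_decomp hm
    rw [hdec, pv_splitOn_cons B hna]; simp
  · rw [pv_splitOn_nomem hm]; simp

theorem pv_join_splitOn (c : Char) :
    ∀ (n : Nat) (b : List Char), b.length ≤ n →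
      PySem.Chars.join [c] (PySem.Chars.splitOn b [c]) = b := by
  intro n
  induction n with
  | zero =>
    intro b hb
    have hnil : b = [] := List.eq_nil_of_length_eq_zero (by omega)
    subst hnil
    rw [pv_splitOn_nomem (by simp), PySem.Chars.join_singleton]
  | succ m ih =>
    intro b hb
    by_cases hm : c ∈ b
    · obtain ⟨A, B, hdec, hna⟩ := pv_mem_decomp hm
      subst hdec
      have hlen : (A ++ c :: B).length = A.length + 1 + B.length := by
        rw [List.length_append, List.length_cons]; omega
      rw [hlen] at hb
      rw [pv_splitOn_cons B hna]
      obtain ⟨q, rest, hq⟩ : ∃ q rest, PySem.Chars.splitOn B [c] = q :: rest := by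
        cases hsb : PySem.Chars.splitOn B [c] with
        | nil => exact absurd hsb (pv_splitOn_ne_nil c B)
        | cons q rest => exact ⟨q, rest, rfl⟩
      rw [hq, PySem.Chars.join_cons_cons, ← hq, ih B (by omega)]
      simp
    · rw [pv_splitOn_nomem hm, PySem.Chars.join_singleton]

-- ---- splitOnMax with maxsplit 1, single-character separator ----
theorem pv_goM0 (c : Char) (fuel : Nat) (l cur : List Char) (acc : List (List Char)) :
    PySem.Chars.splitOnMax.go [c] fuel 0 l cur acc = acc.reverse ++ [cur.reverse ++ l] := by
  cases fuel with
  | zero => simp [PySem.Chars.splitOnMax.go]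
  | succ f => cases l <;> simp [PySem.Chars.splitOnMax.go]

theorem pv_goM2 (c : Char) (a b : List Char) (ha : c ∉ a) :
    ∀ (f : Nat) (cur : List Char) (acc : List (List Char)), a.length ≤ f →
      PySem.Chars.splitOnMax.go [c] (f + 1) 1 (a ++ c :: b) cur acc =
        acc.reverse ++ [cur.reverse ++ a, b] := by
  induction a with
  | nil =>
    intro f cur acc _
    simp only [List.nil_append]
    rw [PySem.Chars.splitOnMax.go]
    simp only [show [c].isPrefixOf (c :: b) = true from by simp [List.isPrefixOf], if_true]
    rw [if_neg (show ¬ (1 : Nat) = 0 from by omega)]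
    simp only [Nat.sub_self]
    rw [pv_goM0]
    simp
  | cons x xs ih =>
    intro f cur acc hf
    have hx : c ≠ x := fun hh => ha (hh ▸ List.mem_cons_self ..)
    have hxs : c ∉ xs := fun hm => ha (List.mem_cons_of_mem _ hm)
    rw [List.length_cons] at hf
    cases f with
    | zero => omega
    | succ f' =>
      simp only [List.cons_append]
      rw [PySem.Chars.splitOnMax.go]
      simp only [if_neg (show ¬ (1 : Nat) = 0 from by omega)]
      simp only [show [c].isPrefixOf (x :: (xs ++ c :: b)) = false from by
        simp [List.isPrefixOf, hx], Bool.false_eq_true, if_false]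
      rw [ih hxs f' (x :: cur) acc (by omega)]
      simp

theorem pv_SM2 {c : Char} {a : List Char} (b : List Char) (ha : c ∉ a) :
    PySem.Chars.splitOnMax (a ++ c :: b) [c] 1 = [a, b] := by
  rw [PySem.Chars.splitOnMax, if_neg (by norm_num)]
  have hlen : (a ++ c :: b).length = a.length + 1 + b.length := by
    rw [List.length_append, List.length_cons]; omega
  rw [show (1 : Int).toNat = 1 from rfl, hlen]
  rw [show a.length + 1 + b.length + 1 = (a.length + 1 + b.length) + 1 from rfl]
  rw [pv_goM2 c a b ha _ [] [] (by omega)]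
  simp

-- ---- the common char-level reference: fused scan+parse over a line list ----
def pvRefStep (d : PySem.Dict String String) (raw : List Char) : PySem.Dict String String :=
  if ':' ∈ raw then
    match PySem.Chars.splitOnMax raw [':'] 1 with
    | k :: v :: _ =>
        d.insert (String.ofList (PySem.Chars.strip k))
          (String.ofList (PySem.Chars.stripChars
            (PySem.Chars.stripChars (PySem.Chars.strip v) ['"']) ['\'']))
    | _ => d
  else d

def pvRef : List (List Char) → PySem.Dict String String →
    Option (PySem.Dict String String × List Char)
  | [], _ => none
  | [l], d => if PySem.Chars.strip l = "---".toList then some (d, []) else none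
  | l :: l' :: ls, d =>
    if PySem.Chars.strip l = "---".toList then some (d, PySem.Chars.join ['\n'] (l' :: ls))
    else pvRef (l' :: ls) (pvRefStep d l)

theorem pv_fence_eq (l : String) :
    (PySem.Str.strip l == "---") = decide (PySem.Chars.strip l.toList = "---".toList) := by
  by_cases h : PySem.Chars.strip l.toList = "---".toList
  · have hs : PySem.Str.strip l = "---" :=
      String.toList_inj.mp (by rw [PySem.Str.toList_strip]; exact h)
    have h' : PySem.Chars.strip l.toList = ['-', '-', '-'] := h
    simp [hs, h']
  · have hs : PySem.Str.strip l ≠ "---" := by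
      intro hh; apply h
      rw [← PySem.Str.toList_strip, hh]
    have h' : PySem.Chars.strip l.toList ≠ ['-', '-', '-'] := h
    simp [hs, h']

theorem pv_stepA_eq (d : PySem.Dict String String) (raw : String) :
    pvStepA d raw = pvRefStep d raw.toList := by
  unfold pvStepA pvRefStep
  by_cases hm : ':' ∈ raw.toList
  · have hin : PySem.Str.isIn ":" raw = true := by
      rw [PySem.Str.isIn_eq]
      exact (PySem.Chars.isIn_iff_infix _ _).mpr (pv_singleton_infix.mpr hm)
    obtain ⟨A, B, hdec, hna⟩ := pv_mem_decomp hm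
    have hsm : PySem.Chars.splitOnMax raw.toList [':'] 1 = [A, B] := by
      rw [hdec]; exact pv_SM2 B hna
    have hchars : PySem.Chars.splitMax? raw.toList ":".toList 1 = some [A, B] := by
      rw [PySem.Chars.splitMax?]
      simp only [show (":".toList) = [':'] from rfl]
      simp [hsm]
    have hmap := PySem.Str.splitMax?_map raw ":" 1
    rw [hchars] at hmap
    obtain ⟨L, hL, hLmap⟩ := Option.map_eq_some_iff.mp hmap
    obtain ⟨K, V, hKV⟩ : ∃ K V, L = [K, V] := by
      cases L with
      | nil => simp at hLmap
      | cons k t =>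
        cases t with
        | nil => simp at hLmap
        | cons v t2 =>
          cases t2 with
          | nil => exact ⟨k, v, rfl⟩
          | cons _ _ => simp at hLmap
    subst hKV
    simp only [List.map_cons, List.map_nil, List.cons.injEq, and_true] at hLmap
    obtain ⟨hK, hV⟩ := hLmap
    have e1 : PySem.Str.strip K = String.ofList (PySem.Chars.strip A) :=
      String.toList_inj.mp (by simp [hK])
    have e2 : PySem.Str.stripChars (PySem.Str.stripChars (PySem.Str.strip V) "\"") "'" =
        String.ofList (PySem.Chars.stripChars
          (PySem.Chars.stripChars (PySem.Chars.strip B) ['"']) ['\'']) :=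
      String.toList_inj.mp (by simp [hV])
    rw [if_pos hin, if_pos hm]
    simp only [hL, hsm]
    rw [e1, e2]
  · have hin : PySem.Str.isIn ":" raw = false := by
      rw [PySem.Str.isIn_eq]
      exact (PySem.Chars.isIn_eq_false_iff _ _).mpr (fun h => hm (pv_singleton_infix.mp h))
    rw [hin]
    simp [hm]

set_option maxHeartbeats 1000000 in
theorem pv_stepB_eq (d : PySem.Dict String String) (line : String) :
    pvStepB d line = pvRefStep d line.toList := by
  unfold pvStepB pvRefStep
  have hfind : PySem.Str.find line ":" = PySem.Chars.find line.toList [':'] := by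
    rw [PySem.Str.find_eq]; rfl
  by_cases h0 : (0 : Int) ≤ PySem.Chars.find line.toList [':']
  · have hm : ':' ∈ line.toList :=
      pv_singleton_infix.mp ((PySem.Chars.find_nonneg_iff line.toList [':']).mp h0)
    obtain ⟨hdec, hna⟩ := pv_find_decomp h0
    set j := (PySem.Chars.find line.toList [':']).toNat with hj
    have hsm : PySem.Chars.splitOnMax line.toList [':'] 1 =
        [line.toList.take j, line.toList.drop (j + 1)] := by
      conv_lhs => rw [hdec]
      exact pv_SM2 _ hna
    have hjc : PySem.Chars.find line.toList [':'] = ((j : Nat) : Int) := by omega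
    have e1 : PySem.Str.strip (PySem.Str.slice line none (some ((j : Nat) : Int))) =
        String.ofList (PySem.Chars.strip (line.toList.take j)) :=
      String.toList_inj.mp (by simp [PySem.List.slice_to_natCast])
    have e2 : PySem.Str.stripChars (PySem.Str.stripChars
          (PySem.Str.strip (PySem.Str.slice line (some (((j : Nat) : Int) + 1)) none)) "\"") "'" =
        String.ofList (PySem.Chars.stripChars
          (PySem.Chars.stripChars (PySem.Chars.strip (line.toList.drop (j + 1))) ['"']) ['\'']) :=
      String.toList_inj.mp (by
        simp
        rw [show ((j : Nat) : Int) + 1 = ((j + 1 : Nat) : Int) from by push_cast; ring,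
          PySem.List.slice_from_natCast])
    rw [hfind, if_pos h0, if_pos hm, hjc]
    simp only [hsm]
    rw [e1, e2]
  · have hm : ':' ∉ line.toList := pv_find_neg (by omega)
    rw [hfind, if_neg h0, if_neg hm]

theorem pvGoB_neg (s : String) (d : PySem.Dict String String)
    (h : PySem.Str.find s "\n" < 0) :
    pvGoB s d = if PySem.Str.strip s == "---" then some (d, "") else none := by
  rw [pvGoB]
  simp only [if_pos h, dif_pos h]

theorem pvGoB_pos (s : String) (d : PySem.Dict String String)
    (h : ¬ PySem.Str.find s "\n" < 0) :
    pvGoB s d =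
      if PySem.Str.strip (PySem.Str.slice s none (some (PySem.Str.find s "\n"))) == "---" then
        some (d, PySem.Str.slice s (some (PySem.Str.find s "\n" + 1)) none)
      else pvGoB (PySem.Str.slice s (some (PySem.Str.find s "\n" + 1)) none)
        (pvStepB d (PySem.Str.slice s none (some (PySem.Str.find s "\n")))) := by
  rw [pvGoB]
  simp only [if_neg h, dif_neg h]

theorem pv_goB_eq : ∀ (n : Nat) (s : String) (d : PySem.Dict String String),
    s.toList.length ≤ n →
    Option.map (fun p => (p.1, p.2.toList)) (pvGoB s d) =
      pvRef (PySem.Chars.splitOn s.toList ['\n']) d := by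
  intro n
  induction n using Nat.strong_induction_on with
  | _ n ih =>
    intro s d hle
    by_cases hneg : PySem.Str.find s "\n" < 0
    · have hfneg : PySem.Chars.find s.toList ['\n'] < 0 := by
        have := hneg; rw [PySem.Str.find_eq] at this; exact this
      have hm : '\n' ∉ s.toList := pv_find_neg hfneg
      rw [pvGoB_neg s d hneg, pv_splitOn_nomem hm, pv_fence_eq]
      by_cases hf : PySem.Chars.strip s.toList = "---".toList
      · rw [decide_eq_true hf]
        simp [pvRef, hf, show ("" : String).toList = [] from rfl]
      · rw [decide_eq_false hf]
        have hf' : PySem.Chars.strip s.toList ≠ ['-', '-', '-'] := hf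
        simp [pvRef, hf']
    · have h0 : (0 : Int) ≤ PySem.Chars.find s.toList ['\n'] := by
        have h' : ¬ PySem.Chars.find s.toList ['\n'] < 0 := by
          intro hc; apply hneg; rw [PySem.Str.find_eq]; exact hc
        omega
      obtain ⟨hdec, hna⟩ := pv_find_decomp h0
      set j := (PySem.Chars.find s.toList ['\n']).toNat with hj
      have hjc : PySem.Str.find s "\n" = ((j : Nat) : Int) := by
        rw [PySem.Str.find_eq]
        show PySem.Chars.find s.toList ['\n'] = ((j : Nat) : Int)
        omega
      have hline : (PySem.Str.slice s none (some (PySem.Str.find s "\n"))).toList =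
          s.toList.take j := by
        rw [PySem.Str.toList_slice, PySem.Chars.slice_eq_listSlice, hjc,
          PySem.List.slice_to_natCast]
      have hrest : (PySem.Str.slice s (some (PySem.Str.find s "\n" + 1)) none).toList =
          s.toList.drop (j + 1) := by
        rw [PySem.Str.toList_slice, PySem.Chars.slice_eq_listSlice, hjc,
          show ((j : Nat) : Int) + 1 = ((j + 1 : Nat) : Int) from by push_cast; ring,
          PySem.List.slice_from_natCast]
      have hsplit : PySem.Chars.splitOn s.toList ['\n'] =
          s.toList.take j :: PySem.Chars.splitOn (s.toList.drop (j + 1)) ['\n'] := by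
        conv_lhs => rw [hdec]
        exact pv_splitOn_cons _ hna
      have hlenB : (s.toList.drop (j + 1)).length < s.toList.length := by
        have hlen := congrArg List.length hdec
        rw [List.length_append, List.length_cons] at hlen
        rw [List.length_drop]
        omega
      rw [pvGoB_pos s d hneg, hsplit, pv_fence_eq]
      obtain ⟨q, rest, hq⟩ : ∃ q rest,
          PySem.Chars.splitOn (s.toList.drop (j + 1)) ['\n'] = q :: rest := by
        cases hsb : PySem.Chars.splitOn (s.toList.drop (j + 1)) ['\n'] with
        | nil => exact absurd hsb (pv_splitOn_ne_nil _ _)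
        | cons q rest => exact ⟨q, rest, rfl⟩
      rw [hq, hline]
      by_cases hf : PySem.Chars.strip (s.toList.take j) = "---".toList
      · rw [decide_eq_true hf]
        rw [show pvRef (s.toList.take j :: q :: rest) d =
          if PySem.Chars.strip (s.toList.take j) = "---".toList then
            some (d, PySem.Chars.join ['\n'] (q :: rest))
          else pvRef (q :: rest) (pvRefStep d (s.toList.take j)) from rfl, if_pos hf]
        rw [← hq, pv_join_splitOn '\n' (s.toList.drop (j + 1)).length _ le_rfl,
          if_pos (rfl : (true : Bool) = true), Option.map_some]
        exact congrArg some (congrArg (Prod.mk d) hrest)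
      · rw [decide_eq_false hf]
        rw [show pvRef (s.toList.take j :: q :: rest) d =
          if PySem.Chars.strip (s.toList.take j) = "---".toList then
            some (d, PySem.Chars.join ['\n'] (q :: rest))
          else pvRef (q :: rest) (pvRefStep d (s.toList.take j)) from rfl, if_neg hf]
        simp only [Bool.false_eq_true, if_false]
        have hn0 : 0 < n := by omega
        rw [ih (n - 1) (by omega) _ _ (by rw [hrest]; omega)]
        rw [hrest, ← hq, pv_stepB_eq, hline]

theorem pv_scanA_ref : ∀ (lines : List String) (d : PySem.Dict String String),
    pvRef (lines.map String.toList) d =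
      match pvScanA lines with
      | none => none
      | some bl => some (bl.foldl pvStepA d,
          PySem.Chars.join ['\n'] ((lines.drop (bl.length + 1)).map String.toList)) := by
  intro lines
  induction lines with
  | nil => intro d; rfl
  | cons l ls ih =>
    intro d
    rw [pvScanA]
    by_cases hf : PySem.Chars.strip l.toList = "---".toList
    · have hb : (PySem.Str.strip l == "---") = true := by
        rw [pv_fence_eq]; exact decide_eq_true hf
      rw [hb]
      simp only [if_true]
      have hf' : PySem.Chars.strip l.toList = ['-', '-', '-'] := hf
      cases ls with
      | nil => simp [pvRef, hf', PySem.Chars.join_nil]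
      | cons l' ls' => simp [pvRef, hf']
    · have hb : (PySem.Str.strip l == "---") = false := by
        rw [pv_fence_eq, decide_eq_false_iff_not]; exact hf
      rw [hb]
      simp only [Bool.false_eq_true, if_false]
      have hf' : PySem.Chars.strip l.toList ≠ ['-', '-', '-'] := hf
      cases ls with
      | nil =>
        simp [pvRef, hf', pvScanA]
      | cons l' ls' =>
        simp only [List.map_cons]
        rw [show (l.toList :: l'.toList :: ls'.map String.toList) =
          l.toList :: ((l' :: ls').map String.toList) from rfl]
        rw [show pvRef (l.toList :: (l' :: ls').map String.toList) d =
          if PySem.Chars.strip l.toList = "---".toList then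
            some (d, PySem.Chars.join ['\n'] ((l' :: ls').map String.toList))
          else pvRef ((l' :: ls').map String.toList) (pvRefStep d l.toList) from rfl]
        rw [if_neg hf]
        rw [ih (pvRefStep d l.toList)]
        rw [← pv_stepA_eq]
        cases hscan : pvScanA (l' :: ls') with
        | none => simp
        | some bl =>
          simp only [Option.map_some]
          congr 1

-- ===== VERDICT (by name: the statement is the Claim_ definition above) =====
set_option maxHeartbeats 1000000 in
theorem extract_leading_yaml_block_py_spec : Claim_equal_extract_leading_yaml_block_py := by
  intro text _
  show extract_leading_yaml_block_py text = extract_leading_yaml_block_py_alt text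
  dsimp only [extract_leading_yaml_block_py, extract_leading_yaml_block_py_alt]
  by_cases hsw : PySem.Str.startswith (PySem.Str.lstrip text) "---" = true
  · rw [hsw]
    by_cases hm : '\n' ∈ (PySem.Str.lstrip text).toList
    · have hin : PySem.Str.isIn "\n" (PySem.Str.lstrip text) = true := by
        rw [PySem.Str.isIn_eq]
        exact (PySem.Chars.isIn_iff_infix _ _).mpr (pv_singleton_infix.mpr hm)
      rw [hin]
      simp only [Bool.not_true, Bool.or_self, Bool.false_eq_true, if_false]
      have h0 : (0 : Int) ≤ PySem.Chars.find (PySem.Str.lstrip text).toList ['\n'] :=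
        (PySem.Chars.find_nonneg_iff _ _).mpr (pv_singleton_infix.mpr hm)
      obtain ⟨hdec, hna⟩ := pv_find_decomp h0
      set j := (PySem.Chars.find (PySem.Str.lstrip text).toList ['\n']).toNat with hj
      have hsplit : PySem.Chars.splitOn (PySem.Str.lstrip text).toList ['\n'] =
          (PySem.Str.lstrip text).toList.take j ::
            PySem.Chars.splitOn ((PySem.Str.lstrip text).toList.drop (j + 1)) ['\n'] := by
        conv_lhs => rw [hdec]
        exact pv_splitOn_cons _ hna
      have hchars : PySem.Chars.split? (PySem.Str.lstrip text).toList "\n".toList =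
          some (PySem.Chars.splitOn (PySem.Str.lstrip text).toList ['\n']) := by
        rw [PySem.Chars.split?]
        rfl
      have hmap := PySem.Str.split?_map (PySem.Str.lstrip text) "\n"
      rw [hchars, hsplit] at hmap
      obtain ⟨P, hP, hPmap⟩ := Option.map_eq_some_iff.mp hmap
      rw [hP]
      simp only [Option.getD_some]
      obtain ⟨p0, Pt, rfl⟩ : ∃ p0 Pt, P = p0 :: Pt := by
        cases P with
        | nil => simp at hPmap
        | cons a b => exact ⟨a, b, rfl⟩
      simp only [List.map_cons, List.cons.injEq] at hPmap
      obtain ⟨hp0, hPt⟩ := hPmap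
      have hlen2 : ¬ (p0 :: Pt).length < 2 := by
        have hlenPt : Pt.length =
            (PySem.Chars.splitOn ((PySem.Str.lstrip text).toList.drop (j + 1)) ['\n']).length := by
          rw [← hPt, List.length_map]
        have hnn := pv_splitOn_ne_nil '\n' ((PySem.Str.lstrip text).toList.drop (j + 1))
        have : 0 < (PySem.Chars.splitOn ((PySem.Str.lstrip text).toList.drop (j + 1)) ['\n']).length :=
          List.length_pos_of_ne_nil hnn
        simp only [List.length_cons]
        omega
      rw [if_neg hlen2]
      have hjc : PySem.Str.find (PySem.Str.lstrip text) "\n" = ((j : Nat) : Int) := by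
        rw [PySem.Str.find_eq]
        show PySem.Chars.find (PySem.Str.lstrip text).toList ['\n'] = ((j : Nat) : Int)
        omega
      have hrest : (PySem.Str.slice (PySem.Str.lstrip text)
          (some (PySem.Str.find (PySem.Str.lstrip text) "\n" + 1)) none).toList =
          (PySem.Str.lstrip text).toList.drop (j + 1) := by
        rw [PySem.Str.toList_slice, PySem.Chars.slice_eq_listSlice, hjc,
          show ((j : Nat) : Int) + 1 = ((j + 1 : Nat) : Int) from by push_cast; ring,
          PySem.List.slice_from_natCast]
      have hGB := pv_goB_eq (PySem.Str.slice (PySem.Str.lstrip text)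
          (some (PySem.Str.find (PySem.Str.lstrip text) "\n" + 1)) none).toList.length
          (PySem.Str.slice (PySem.Str.lstrip text)
          (some (PySem.Str.find (PySem.Str.lstrip text) "\n" + 1)) none)
          PySem.Dict.empty le_rfl
      rw [hrest] at hGB
      have hAR := pv_scanA_ref Pt PySem.Dict.empty
      rw [hPt] at hAR
      rw [show (p0 :: Pt).tail = Pt from rfl]
      cases hscan : pvScanA Pt with
      | none =>
        rw [hscan] at hAR
        have hnone : pvGoB (PySem.Str.slice (PySem.Str.lstrip text)
            (some (PySem.Str.find (PySem.Str.lstrip text) "\n" + 1)) none)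
            PySem.Dict.empty = none := by
          have := hGB.trans hAR
          exact Option.map_eq_none_iff.mp this
        rw [hnone]
      | some bl =>
        rw [hscan] at hAR
        have hsome := hGB.trans hAR
        obtain ⟨pr, hpr, hprmap⟩ := Option.map_eq_some_iff.mp hsome
        rw [hpr]
        have h1 : pr.1 = bl.foldl pvStepA PySem.Dict.empty := congrArg Prod.fst hprmap
        have h2 : pr.2.toList =
            PySem.Chars.join ['\n'] ((Pt.drop (bl.length + 1)).map String.toList) :=
          congrArg Prod.snd hprmap
        obtain ⟨m1, r1⟩ := pr
        simp only at h1 h2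
        refine congrArg₂ Prod.mk ?_ ?_
        · rw [h1]
        · apply String.toList_inj.mp
          rw [PySem.Str.toList_join,
            show ((1 + bl.length : Nat) : Int) + 1 = ((bl.length + 2 : Nat) : Int) from by
              push_cast; ring,
            PySem.List.slice_from_natCast,
            show (p0 :: Pt).drop (bl.length + 2) = Pt.drop (bl.length + 1) from rfl, h2]
          rfl
    · have hin : PySem.Str.isIn "\n" (PySem.Str.lstrip text) = false := by
        rw [PySem.Str.isIn_eq]
        exact (PySem.Chars.isIn_eq_false_iff _ _).mpr (fun h => hm (pv_singleton_infix.mp h))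
      rw [hin]
      simp only [Bool.not_true, Bool.not_false, Bool.false_or, if_true]
      have hchars : PySem.Chars.split? (PySem.Str.lstrip text).toList "\n".toList =
          some (PySem.Chars.splitOn (PySem.Str.lstrip text).toList ['\n']) := by
        rw [PySem.Chars.split?]
        rfl
      have hmap := PySem.Str.split?_map (PySem.Str.lstrip text) "\n"
      rw [hchars, pv_splitOn_nomem hm] at hmap
      obtain ⟨P, hP, hPmap⟩ := Option.map_eq_some_iff.mp hmap
      rw [hP]
      simp only [Option.getD_some]
      have hlen1 : P.length < 2 := by
        have := congrArg List.length hPmap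
        rw [List.length_map] at this
        simp at this
        omega
      rw [if_pos hlen1]
      simp
  · rw [Bool.not_eq_true] at hsw
    rw [hsw]
    simp only [Bool.not_false, Bool.true_or, if_true]
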